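-- pv_equiv track=rewrite | github.com/rout369/rout369-hash_trace_2.0 | CLI/hash_features.py | count_consecutive_repeats
-- ===== SOURCE A (Python) =====
-- def count_consecutive_repeats(string):
--     """Count consecutive repeated characters"""
--     if not string:
--         return 0
--     repeats = 0
--     current_char = string[0]
--     current_count = 1
--
--     for i in range(1, len(string)):
--         if string[i] == current_char:
--             current_count += 1
--         else:
--             if current_count > 1:
--                 repeats += current_count - 1
--             current_char = string[i]
--             current_count = 1
--
--     if current_count > 1:
--         repeats += current_count - 1
--
--     return repeats
-- ===== SOURCE B (Python) =====
-- def count_consecutive_repeats(string):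
--     """Count consecutive repeated characters"""
--     return sum(a == b for a, b in zip(string, string[1:]))
-- ===== Notes on version B (the rewrite author's own statement) =====
-- stated objective: idiomatic
-- what changed: Drops A's run-tracking state machine (current_char/current_count with flushes) entirely: B counts equal adjacent pairs directly by zipping the string with its own tail, since each run of length L contributes exactly L-1 such pairs.
import Mathlib
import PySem

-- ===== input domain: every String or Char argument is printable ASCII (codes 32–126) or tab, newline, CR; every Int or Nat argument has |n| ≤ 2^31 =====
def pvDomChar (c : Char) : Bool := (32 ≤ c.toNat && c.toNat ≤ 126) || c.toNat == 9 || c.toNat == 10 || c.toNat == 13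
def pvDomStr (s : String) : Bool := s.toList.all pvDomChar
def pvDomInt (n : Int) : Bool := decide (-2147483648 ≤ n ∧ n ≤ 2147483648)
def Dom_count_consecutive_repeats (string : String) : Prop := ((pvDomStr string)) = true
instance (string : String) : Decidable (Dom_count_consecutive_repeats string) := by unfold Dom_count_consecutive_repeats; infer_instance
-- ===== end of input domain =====

-- B drops A's run-tracking state machine and instead counts equal adjacent pairs
-- by zipping the string with its own tail; objective: idiomatic.

-- ===== PORT A =====
-- the for-loop over range(1, len(string)) with state (repeats, current_char, current_count),
-- followed by the trailing 'if current_count > 1' flush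
def pvALoop : List Char → Int → Char → Int → Int
  | [], repeats, _, current_count =>
      if current_count > 1 then repeats + (current_count - 1) else repeats
  | c :: rest, repeats, current_char, current_count =>
      if c == current_char then
        pvALoop rest repeats current_char (current_count + 1)
      else
        pvALoop rest (if current_count > 1 then repeats + (current_count - 1) else repeats) c 1

def count_consecutive_repeats (string : String) : Int :=
  match string.toList with
  | [] => 0
  | c :: rest => pvALoop rest 0 c 1

-- ===== PORT B =====
-- sum(a == b for a, b in zip(string, string[1:])): fold of the pairwise zip
def count_consecutive_repeats_alt (string : String) : Int :=
  (string.toList.zip (PySem.List.slice string.toList (some 1) none)).foldl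
    (fun acc p => acc + (if p.1 == p.2 then 1 else 0)) 0

-- ===== PRECONDITION & SPEC =====
def Spec_count_consecutive_repeats (string : String) (out : Int) : Prop := out = count_consecutive_repeats_alt string
instance (string : String) (out : Int) : Decidable (Spec_count_consecutive_repeats string out) := by unfold Spec_count_consecutive_repeats; infer_instance

-- ===== CLAIM =====
def Claim_equal_count_consecutive_repeats : Prop := ∀ (string : String), Dom_count_consecutive_repeats string → Spec_count_consecutive_repeats string (count_consecutive_repeats string)

-- ===== LEMMAS AND PROOFS =====

-- number of adjacent equal pairs, as a structural recursion (proof-side characterisation)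
def pvPairs : List Char → Int
  | a :: b :: t => (if a == b then 1 else 0) + pvPairs (b :: t)
  | _ => 0

theorem pvFold_eq_pvPairs (l : List Char) : ∀ acc : Int,
    (l.zip l.tail).foldl (fun acc p => acc + (if p.1 == p.2 then 1 else 0)) acc
      = acc + pvPairs l := by
  induction l with
  | nil => intro acc; simp [pvPairs]
  | cons a t ih =>
      intro acc
      cases t with
      | nil => simp [pvPairs]
      | cons b u =>
          simp only [List.tail_cons, List.zip_cons_cons, List.foldl_cons, pvPairs]
          rw [List.tail_cons] at ih
          rw [ih]
          ring

theorem pvALoop_eq (rest : List Char) :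
    ∀ (repeats : Int) (cur : Char) (cc : Int), 1 ≤ cc →
    pvALoop rest repeats cur cc = repeats + (cc - 1) + pvPairs (cur :: rest) := by
  induction rest with
  | nil =>
      intro repeats cur cc h
      simp only [pvALoop, pvPairs]
      split <;> omega
  | cons c t ih =>
      intro repeats cur cc h
      by_cases hc : c = cur
      · have hb : (c == cur) = true := by simp [hc]
        have hb2 : (cur == c) = true := by simp [hc]
        simp only [pvALoop, pvPairs, hb, hb2, if_true]
        rw [ih repeats cur (cc + 1) (by omega), hc]
        omega
      · have hb : (c == cur) = false := by simpa using hc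
        have hb' : (cur == c) = false := by simpa using Ne.symm hc
        simp only [pvALoop, pvPairs, hb, hb', Bool.false_eq_true, if_false]
        rw [ih _ c 1 (by omega)]
        split <;> omega

-- ===== VERDICT =====
theorem count_consecutive_repeats_spec : Claim_equal_count_consecutive_repeats := by
  intro s _
  unfold Spec_count_consecutive_repeats count_consecutive_repeats count_consecutive_repeats_alt
  rw [PySem.List.slice_from_one, pvFold_eq_pvPairs]
  cases h : s.toList with
  | nil => simp [pvPairs]
  | cons c rest =>
      show pvALoop rest 0 c 1 = 0 + pvPairs (c :: rest)
      rw [pvALoop_eq rest 0 c 1 (by omega)]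
      ring
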